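-- pv_equiv track=rewrite | github.com/fan-ziqi/openpi-comet | src/openpi/shared/client.py | generate_stylized_plan
-- ===== SOURCE A (Python) =====
-- def generate_stylized_plan(
--     list_of_plans: list[str], current_plan: str, current_plan_completed: bool = False
-- ) -> str:
--     """
--     Generate a stylized high-level plan list with status markers.
--
--     Rules:
--     - All plans before the current plan are marked as [o].
--     - If current_plan_completed is False:
--         - Current plan is marked as [-].
--         - All plans after the current plan are marked as [x].
--     - If current_plan_completed is True:
--         - Current plan is marked as [o].
--         - The plan immediately after the current plan is marked as [-] (if it exists).
--         - All remaining plans after that are marked as [x].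
--
--     Args:
--         list_of_plans: Ordered list of plan step strings.
--         current_plan: The plan string that is the current focus.
--         current_plan_completed: Whether the current plan has been completed.
--
--     Returns:
--         A single string with one formatted plan per line.
--
--     Raises:
--         ValueError: If current_plan is not found in list_of_plans.
--     """
--     normalized_plans = [p.strip() for p in list_of_plans]
--     target = current_plan.strip()
--     try:
--         current_index = next(i for i, p in enumerate(normalized_plans) if p == target)
--     except StopIteration:
--         raise ValueError(f"current_plan not found in list_of_plans: '{current_plan}'")
--
--     lines: list[str] = []
--     for i, plan in enumerate(list_of_plans):
--         if i < current_index: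
--             prefix = "[o]"
--         elif i == current_index:
--             prefix = "[o]" if current_plan_completed else "[-]"
--         elif current_plan_completed and i == current_index + 1:
--             prefix = "[-]"
--         else:
--             prefix = "[x]"
--         lines.append(f"{prefix} {plan}")
--     return "\n".join(lines)
-- ===== SOURCE B (Python) =====
-- def generate_stylized_plan(
--     list_of_plans: list[str], current_plan: str, current_plan_completed: bool = False
-- ) -> str:
--     """Boundary-based reformulation: one 'active' cut replaces the positional rules."""
--     target = current_plan.strip()
--     try:
--         current_index = [p.strip() for p in list_of_plans].index(target)
--     except ValueError:
--         raise ValueError(f"current_plan not found in list_of_plans: '{current_plan}'")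
--     n = len(list_of_plans)
--     active = current_index + 1 if current_plan_completed else current_index
--     prefixes = ["[o]"] * active
--     if active < n:
--         prefixes = prefixes + ["[-]"] + ["[x]"] * (n - active - 1)
--     return "\n".join(f"{p} {plan}" for p, plan in zip(prefixes, list_of_plans))
-- ===== Notes on version B (the rewrite author's own statement) =====
-- stated objective: simpler
-- what changed: Replaces A's per-index four-way conditional chain inside the loop by a single boundary index 'active' (current_index, +1 if completed) and builds the marker column as three homogeneous runs ([o]*active, one [-], [x]*rest) zipped with the plans.
-- outside the precondition, e.g. on generate_stylized_plan(['a'], 'b', False): A raises ValueError, B raises ValueError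
import Mathlib
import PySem

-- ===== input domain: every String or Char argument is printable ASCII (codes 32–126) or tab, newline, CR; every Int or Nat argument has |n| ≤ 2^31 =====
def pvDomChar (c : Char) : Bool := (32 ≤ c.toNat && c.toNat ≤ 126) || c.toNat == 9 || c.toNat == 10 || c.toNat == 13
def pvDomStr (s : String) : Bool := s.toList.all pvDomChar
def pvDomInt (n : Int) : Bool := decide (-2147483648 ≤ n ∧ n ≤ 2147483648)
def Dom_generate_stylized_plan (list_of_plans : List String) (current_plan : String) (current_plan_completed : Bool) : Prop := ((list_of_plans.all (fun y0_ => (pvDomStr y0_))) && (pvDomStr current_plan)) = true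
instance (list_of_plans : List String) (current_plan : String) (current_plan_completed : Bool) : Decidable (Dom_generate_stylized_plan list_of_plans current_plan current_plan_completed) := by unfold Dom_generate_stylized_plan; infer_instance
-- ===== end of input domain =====

-- B replaces A's per-index conditional chain by one boundary 'active' and builds the
-- prefix column as three homogeneous runs (objective: simpler decomposition, same cost).

-- ===== PORT A =====
def generate_stylized_plan (list_of_plans : List String) (current_plan : String) (current_plan_completed : Bool) : String :=
  let normalized_plans := list_of_plans.map (fun p => PySem.Str.strip p)
  let target := PySem.Str.strip current_plan
  match (PySem.List.enumerate normalized_plans).find? (fun ip => ip.2 == target) with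
  | none => ""   -- Python raises ValueError here; outside Pre_
  | some found =>
    let current_index : Int := found.1
    let lines : List String :=
      (PySem.List.enumerate list_of_plans).foldl (fun lines ip =>
        let pfx :=
          if ip.1 < current_index then "[o]"
          else if ip.1 == current_index then (if current_plan_completed then "[o]" else "[-]")
          else if current_plan_completed && ip.1 == current_index + 1 then "[-]"
          else "[x]"
        lines ++ [pfx ++ " " ++ ip.2]) []
    PySem.Str.join "\n" lines

-- ===== PORT B =====
def generate_stylized_plan_alt (list_of_plans : List String) (current_plan : String) (current_plan_completed : Bool) : String :=
  let target := PySem.Str.strip current_plan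
  match PySem.List.index? (list_of_plans.map (fun p => PySem.Str.strip p)) target with
  | none => ""   -- Python raises ValueError here; outside Pre_
  | some current_index =>
    let n := list_of_plans.length
    let active := if current_plan_completed then current_index + 1 else current_index
    let prefixes := List.replicate active "[o]"
    let prefixes := if active < n then prefixes ++ ["[-]"] ++ List.replicate (n - active - 1) "[x]" else prefixes
    PySem.Str.join "\n" ((prefixes.zip list_of_plans).map (fun pp => pp.1 ++ " " ++ pp.2))

-- ===== PRECONDITION & SPEC =====
-- Pre_ excludes exactly the inputs where A raises ValueError (stripped current_plan absent
-- from the stripped plans); B raises the same ValueError there.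
def Pre_generate_stylized_plan (list_of_plans : List String) (current_plan : String) (current_plan_completed : Bool) : Prop :=
  PySem.Str.strip current_plan ∈ list_of_plans.map (fun p => PySem.Str.strip p)
instance (list_of_plans : List String) (current_plan : String) (current_plan_completed : Bool) : Decidable (Pre_generate_stylized_plan list_of_plans current_plan current_plan_completed) := by unfold Pre_generate_stylized_plan; infer_instance
def pvWitness_generate_stylized_plan : List String × String × Bool := (["wash dishes", " dry dishes "], "dry dishes", false)

def Spec_generate_stylized_plan (list_of_plans : List String) (current_plan : String) (current_plan_completed : Bool) (out : String) : Prop := out = generate_stylized_plan_alt list_of_plans current_plan current_plan_completed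
instance (list_of_plans : List String) (current_plan : String) (current_plan_completed : Bool) (out : String) : Decidable (Spec_generate_stylized_plan list_of_plans current_plan current_plan_completed out) := by unfold Spec_generate_stylized_plan; infer_instance

-- ===== CLAIM (what is proved, stated in full; the proofs are below) =====
def Claim_equal_generate_stylized_plan : Prop := ∀ (list_of_plans : List String) (current_plan : String) (current_plan_completed : Bool), Dom_generate_stylized_plan list_of_plans current_plan current_plan_completed → Pre_generate_stylized_plan list_of_plans current_plan current_plan_completed → Spec_generate_stylized_plan list_of_plans current_plan current_plan_completed (generate_stylized_plan list_of_plans current_plan current_plan_completed)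

-- ===== LEMMAS AND PROOFS =====

-- A's `next(i for i, p in enumerate(...) if p == target)` is the same index as B's `.index`.
lemma find_enumerate_eq_index (l : List String) (t : String) (s : Int) :
    (PySem.List.enumerate l s).find? (fun ip => ip.2 == t)
      = (PySem.List.index? l t).map (fun k => ((s + k : Int), t)) := by
  induction l generalizing s with
  | nil => simp [PySem.List.enumerate, PySem.List.index?]
  | cons x xs ih =>
    rw [PySem.List.enumerate_cons]
    by_cases hx : x = t
    · subst hx
      rw [List.find?_cons_of_pos (l := PySem.List.enumerate xs (s+1)) (by simp), PySem.List.index?_cons_self]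
      simp
    · rw [List.find?_cons_of_neg (l := PySem.List.enumerate xs (s+1)) (by simpa using hx), ih,
        PySem.List.index?_cons_of_ne xs hx]
      cases PySem.List.index? xs t with
      | none => simp
      | some k =>
        simp only [Option.map_some, Option.bind_eq_bind, Option.bind_some, pure,
          Prod.mk.injEq, Option.some.injEq, and_true]
        push_cast
        ring

-- (zip a b)[i]? as a bind over the two lookups
lemma getElem?_zip' {A B : Type} (as_ : List A) (bs : List B) (i : Nat) :
    (List.zip as_ bs)[i]? = as_[i]?.bind fun a => bs[i]?.map fun b => (a, b) := by
  rw [List.zip_eq_zipWith, List.getElem?_zipWith]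
  cases as_[i]? <;> cases bs[i]? <;> rfl

-- B's prefix column, position by position
lemma prefixes_getElem? (active n j : Nat) (hj : j < n) (ha : active ≤ n) :
    (if active < n then
        List.replicate active "[o]" ++ ["[-]"] ++ List.replicate (n - active - 1) "[x]"
      else List.replicate active "[o]")[j]?
      = some (if j < active then "[o]" else if j = active then "[-]" else "[x]") := by
  by_cases h1 : active < n
  · simp only [h1, if_true]
    by_cases hja : j < active
    · rw [List.append_assoc, List.getElem?_append_left (by simp [hja])]
      simp [hja]
    · rw [List.append_assoc, List.getElem?_append_right (by simp; omega)]
      simp only [List.length_replicate]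
      rcases Nat.lt_or_ge j (active + 1) with hje | hje
      · have : j = active := by omega
        subst this
        simp
      · have hm : j - active = (j - active - 1) + 1 := by omega
        rw [hm]
        simp only [List.cons_append, List.nil_append, List.getElem?_cons_succ,
          List.getElem?_replicate]
        have h2 : j - active - 1 < n - active - 1 := by omega
        have h3 : ¬ j < active := hja
        have h4 : j ≠ active := by omega
        simp [h2, h3, h4]
  · have : active = n := by omega
    subst this
    simp only [h1, if_false]
    simp [hj]

theorem generate_stylized_plan_spec : Claim_equal_generate_stylized_plan := by
  intro l cp c _ hpre
  unfold Spec_generate_stylized_plan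
  unfold generate_stylized_plan generate_stylized_plan_alt
  have hmem : PySem.Str.strip cp ∈ l.map (fun p => PySem.Str.strip p) := hpre
  obtain ⟨k, hidx⟩ := Option.isSome_iff_exists.mp ((PySem.List.index?_isSome_iff _ _).mpr hmem)
  obtain ⟨hk', -, -⟩ := PySem.List.getElem_of_index?_eq_some hidx
  have hk : k < l.length := by simpa using hk'
  simp only [find_enumerate_eq_index, hidx, Option.bind_eq_bind, Option.bind_some,
    Option.pure_def, Option.map_some, PySem.List.foldl_append_singleton_eq_map,
    List.nil_append]
  congr 1
  apply List.ext_getElem?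
  intro j
  rw [List.getElem?_map, List.getElem?_map, getElem?_zip',
    PySem.List.getElem?_enumerate]
  by_cases hj : j < l.length
  · have hl : l[j]? = some l[j] := List.getElem?_eq_getElem hj
    rw [hl, prefixes_getElem? _ _ _ hj (by split_ifs <;> omega)]
    simp only [Option.map_some, Option.bind_some]
    congr 2
    split_ifs <;> simp_all <;> omega
  · have hl : l[j]? = none := List.getElem?_eq_none (by omega)
    rw [hl]
    simp
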